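-- pv_equiv track=rewrite | github.com/hLvMxM/Learning_Data_Mining_with_Python | Chapter 1/code1.py | train_feature_value
-- ===== SOURCE A (Python) =====
-- from collections import defaultdict
-- from operator import itemgetter
--
-- def train_feature_value(X, y_true, feature_index, value):
--     class_counts = defaultdict(int)
--     for sample, y in zip(X, y_true):
--         if sample[feature_index] == value:
--             class_counts[y] += 1
--     sorted_class_counts = sorted(class_counts.items(), key=itemgetter(1), reverse=True)
--     most_frequent_class = sorted_class_counts[0][0]
--     incorrect_predictions = [class_count for class_value, class_count in class_counts.items() if class_value != most_frequent_class]
--     error = sum(incorrect_predictions)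
--     return most_frequent_class,error
-- ===== SOURCE B (Python) =====
-- def train_feature_value(X, y_true, feature_index, value):
--     matching = [y for sample, y in zip(X, y_true) if sample[feature_index] == value]
--     counts = {}
--     for y in matching:
--         counts[y] = counts.get(y, 0) + 1
--     items = list(counts.items())
--     best_class, best_count = items[0]
--     for c, n in items[1:]:
--         if n > best_count:
--             best_class, best_count = c, n
--     return best_class, len(matching) - best_count
-- ===== Notes on version B (the rewrite author's own statement) =====
-- stated objective: simpler
-- what changed: Replaces the sort of the count table and the second filter-and-sum pass by a single running-maximum scan over the counts, computing the error as len(matching) - best_count.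
import Mathlib
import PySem

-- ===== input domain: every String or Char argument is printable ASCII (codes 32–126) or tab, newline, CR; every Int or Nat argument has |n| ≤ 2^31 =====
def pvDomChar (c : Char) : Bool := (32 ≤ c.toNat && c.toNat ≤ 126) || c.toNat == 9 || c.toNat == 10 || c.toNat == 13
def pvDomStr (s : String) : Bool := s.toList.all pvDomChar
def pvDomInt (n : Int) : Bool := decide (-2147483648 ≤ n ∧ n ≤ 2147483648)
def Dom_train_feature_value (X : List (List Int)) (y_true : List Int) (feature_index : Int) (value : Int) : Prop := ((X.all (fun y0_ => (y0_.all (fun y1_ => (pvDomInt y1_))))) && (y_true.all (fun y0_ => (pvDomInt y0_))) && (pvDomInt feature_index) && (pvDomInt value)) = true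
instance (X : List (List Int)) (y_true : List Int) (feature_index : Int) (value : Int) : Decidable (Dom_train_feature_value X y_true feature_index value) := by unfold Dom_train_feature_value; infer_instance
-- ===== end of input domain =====

-- B replaces A's sort-then-filter-and-sum over the class counts by one running-maximum
-- scan and the subtraction total - best_count (objective: simpler, same output).


-- ===== PORT A =====
def train_feature_value (X : List (List Int)) (y_true : List Int) (feature_index : Int) (value : Int) : Int × Int :=
  -- class_counts = defaultdict(int); for sample, y in zip(X, y_true): if sample[feature_index] == value: class_counts[y] += 1
  let class_counts : PySem.Dict Int Int :=
    (X.zip y_true).foldl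
      (fun d p => if PySem.List.pyGetD p.1 feature_index 0 == value then d.modify p.2 0 (· + 1) else d)
      PySem.Dict.empty
  -- sorted(class_counts.items(), key=itemgetter(1), reverse=True)
  let sorted_class_counts := PySem.List.sorted class_counts.items (fun p => p.2) true
  -- most_frequent_class = sorted_class_counts[0][0]  (pyGetD exact under Pre_: the list is nonempty)
  let most_frequent_class := (PySem.List.pyGetD sorted_class_counts 0 (0, 0)).1
  -- error = sum(count for cls, count in class_counts.items() if cls != most_frequent_class)
  let incorrect_predictions := (class_counts.items.filter (fun p => p.1 != most_frequent_class)).map (fun p => p.2)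
  (most_frequent_class, incorrect_predictions.sum)

-- ===== PORT B =====
def train_feature_value_alt (X : List (List Int)) (y_true : List Int) (feature_index : Int) (value : Int) : Int × Int :=
  -- matching = [y for sample, y in zip(X, y_true) if sample[feature_index] == value]
  let matching := ((X.zip y_true).filter (fun p => PySem.List.pyGetD p.1 feature_index 0 == value)).map (fun p => p.2)
  -- counts = {}; for y in matching: counts[y] = counts.get(y, 0) + 1
  let counts : PySem.Dict Int Int :=
    matching.foldl (fun d y => d.insert y (d.getD y 0 + 1)) PySem.Dict.empty
  let items := counts.items
  -- best_class, best_count = items[0]  (pyGetD exact under Pre_: items is nonempty)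
  let best0 := PySem.List.pyGetD items 0 (0, 0)
  -- for c, n in items[1:]: if n > best_count: best_class, best_count = c, n
  let best := items.tail.foldl (fun b p => if p.2 > b.2 then p else b) best0
  (best.1, (matching.length : Int) - best.2)

-- ===== PRECONDITION & SPEC =====
-- Pre_ = exactly where the Python A returns: feature_index must be a valid index into every
-- zipped sample (else IndexError), and at least one zipped sample must match value (else
-- sorted_class_counts[0] raises IndexError).
def Pre_train_feature_value (X : List (List Int)) (y_true : List Int) (feature_index : Int) (value : Int) : Prop :=
  (∀ p ∈ X.zip y_true, PySem.Raise.InRange p.1.length feature_index) ∧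
  (∃ p ∈ X.zip y_true, PySem.List.pyGetD p.1 feature_index 0 = value)
instance (X : List (List Int)) (y_true : List Int) (feature_index : Int) (value : Int) : Decidable (Pre_train_feature_value X y_true feature_index value) := by unfold Pre_train_feature_value; infer_instance
def pvWitness_train_feature_value : List (List Int) × List Int × Int × Int := ([[1], [2]], [0, 1], 0, 1)

def Spec_train_feature_value (X : List (List Int)) (y_true : List Int) (feature_index : Int) (value : Int) (out : Int × Int) : Prop := out = train_feature_value_alt X y_true feature_index value
instance (X : List (List Int)) (y_true : List Int) (feature_index : Int) (value : Int) (out : Int × Int) : Decidable (Spec_train_feature_value X y_true feature_index value out) := by unfold Spec_train_feature_value; infer_instance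

-- ===== CLAIM (what is proved, stated in full; the proofs are below) =====
def Claim_equal_train_feature_value : Prop := ∀ (X : List (List Int)) (y_true : List Int) (feature_index : Int) (value : Int), Dom_train_feature_value X y_true feature_index value → Pre_train_feature_value X y_true feature_index value → Spec_train_feature_value X y_true feature_index value (train_feature_value X y_true feature_index value)

-- ===== LEMMAS AND PROOFS =====

-- A's guarded fold over the zip is the plain fold over the filtered-and-projected list.
theorem foldl_if_filter_map {γ β δ : Type} (xs : List γ) (c : γ → Bool) (g : γ → β)
    (f : δ → β → δ) (init : δ) :
    xs.foldl (fun d x => if c x then f d (g x) else d) init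
      = ((xs.filter c).map g).foldl f init := by
  induction xs generalizing init with
  | nil => rfl
  | cons x xs ih =>
    by_cases h : c x = true <;> simp [h, ih]

-- head of insertBy with the reverse-sort comparator, on a nonempty accumulator
theorem head?_foldl_insertBy {α κ : Type} [LinearOrder κ] (key : α → κ) (xs : List α) :
    ∀ (a : α) (acc : List α),
    (xs.foldl (fun acc x => PySem.List.insertBy (fun p q => decide (key q < key p)) x acc) (a :: acc)).head?
      = some (xs.foldl (fun b x => if key b < key x then x else b) a) := by
  induction xs with
  | nil => intro a acc; rfl
  | cons x xs ih =>
    intro a acc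
    simp only [List.foldl_cons, PySem.List.insertBy]
    by_cases h : key a < key x
    · simp [h, ih]
    · simp [h, ih]

-- head of Python's stable reverse sort = the first element attaining the maximal key
theorem head?_sorted_rev {α κ : Type} [LinearOrder κ] (key : α → κ) (a : α) (t : List α) :
    (PySem.List.sorted (a :: t) key true).head?
      = some (t.foldl (fun b x => if key b < key x then x else b) a) := by
  simp only [PySem.List.sorted]
  simpa [PySem.List.insertBy] using head?_foldl_insertBy key t a []

-- sum of the non-best counts = total − best count, when keys are distinct and best is an item
theorem sum_filter_ne_fst {b : Int × Int} (pairs : List (Int × Int))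
    (hnd : (pairs.map (·.1)).Nodup) (hb : b ∈ pairs) :
    ((pairs.filter (fun p => p.1 != b.1)).map (fun p => p.2)).sum
      = (pairs.map (fun p => p.2)).sum - b.2 := by
  induction pairs with
  | nil => cases hb
  | cons q pairs ih =>
    simp only [List.map_cons, List.nodup_cons] at hnd
    rcases List.mem_cons.mp hb with rfl | hb'
    · have : pairs.filter (fun p => p.1 != b.1) = pairs := by
        apply List.filter_eq_self.mpr
        intro p hp
        simp only [bne_iff_ne, ne_eq]
        exact fun h => hnd.1 (h ▸ List.mem_map_of_mem hp)
      simp [this]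
    · have hne : q.1 ≠ b.1 := fun h => hnd.1 (h ▸ List.mem_map_of_mem hb')
      simp [bne_iff_ne, hne, ih hnd.2 hb']
      ring

-- the values of Counter(m) sum to the length of m
theorem sum_counter_values (m : List Int) :
    ((PySem.Dict.counter m).items.map (fun p => p.2)).sum = (m.length : Int) := by
  rw [PySem.Dict.items_counter]
  have hperm : (PySem.Set.ofList m).Perm m.dedup := by
    rw [List.perm_ext_iff_of_nodup (PySem.Set.nodup_ofList m) m.nodup_dedup]
    intro a; rw [PySem.Set.mem_ofList, List.mem_dedup]
  have := (hperm.map (fun k => (m.count k : Int))).sum_eq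
  simp only [List.map_map, Function.comp_def] at *
  rw [this]
  have : (m.dedup.map (fun k => (m.count k : Int))).sum
      = ((m.dedup.map (fun k => m.count k)).sum : Int) := by
    rw [Nat.cast_list_sum, List.map_map]; rfl
  rw [this, List.sum_map_count_dedup_eq_length]

-- the running-max fold returns an element of the list it scans (or its seed)
theorem foldl_max_mem_pairs (t : List (Int × Int)) (a : Int × Int) :
    t.foldl (fun b p => if p.2 > b.2 then p else b) a = a
      ∨ t.foldl (fun b p => if p.2 > b.2 then p else b) a ∈ t := by
  induction t generalizing a with
  | nil => exact Or.inl rfl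
  | cons x t ih =>
    simp only [List.foldl_cons]
    by_cases h : x.2 > a.2
    · simp only [if_pos h]
      rcases ih x with h' | h'
      · exact Or.inr (by rw [h']; exact List.mem_cons_self)
      · exact Or.inr (List.mem_cons_of_mem _ h')
    · simp only [if_neg h]
      rcases ih a with h' | h'
      · exact Or.inl h'
      · exact Or.inr (List.mem_cons_of_mem _ h')

-- ===== VERDICT (by name: the statement is the Claim_ definition above) =====
theorem train_feature_value_spec : Claim_equal_train_feature_value := by
  intro X y_true feature_index value _ hpre
  simp only [Spec_train_feature_value, train_feature_value, train_feature_value_alt]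
  set m := ((X.zip y_true).filter (fun p => PySem.List.pyGetD p.1 feature_index 0 == value)).map (fun p => p.2) with hm
  -- both count tables are Counter(m)
  have hA : (X.zip y_true).foldl
      (fun d p => if PySem.List.pyGetD p.1 feature_index 0 == value then d.modify p.2 0 (· + 1) else d)
      PySem.Dict.empty = PySem.Dict.counter m := by
    rw [PySem.Dict.counter_eq_foldl]
    exact foldl_if_filter_map (X.zip y_true)
      (fun p => PySem.List.pyGetD p.1 feature_index 0 == value) (fun p => p.2)
      (fun (d : PySem.Dict Int Int) y => d.modify y 0 (· + 1)) PySem.Dict.empty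
  have hB : m.foldl (fun d y => d.insert y (d.getD y 0 + 1)) PySem.Dict.empty
      = PySem.Dict.counter m := PySem.Dict.foldl_insert_getD_add_one_eq_counter m
  rw [hA, hB]
  -- m is nonempty, hence the item list is nonempty
  obtain ⟨hin, p0, hp0, hp0v⟩ := hpre
  have hm_ne : m ≠ [] := by
    simp only [hm, ne_eq, List.map_eq_nil_iff, List.filter_eq_nil_iff, not_forall]
    exact ⟨p0, hp0, by simp [hp0v]⟩
  have hitems : (PySem.Dict.counter m).items
      = (PySem.Set.ofList m).map (fun k => (k, (m.count k : Int))) := PySem.Dict.items_counter m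
  obtain ⟨i, t, hit⟩ : ∃ i t, (PySem.Dict.counter m).items = i :: t := by
    have hx : m.head hm_ne ∈ PySem.Set.ofList m := (PySem.Set.mem_ofList m (m.head hm_ne)).mpr (List.head_mem hm_ne)
    obtain ⟨a, l, hs⟩ := List.exists_cons_of_ne_nil (List.ne_nil_of_mem hx)
    exact ⟨_, _, by rw [hitems, hs]; rfl⟩
  rw [hit]
  -- the best pair, as B computes it
  set best := t.foldl (fun b p => if p.2 > b.2 then p else b) i with hbest
  -- A's head of the stable reverse sort is the same pair
  have hhead : (PySem.List.pyGetD (PySem.List.sorted (i :: t) (fun p : Int × Int => p.2) true) 0 ((0 : Int), (0 : Int))) = best := by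
    have h1 := head?_sorted_rev (fun p : Int × Int => p.2) i t
    have hne2 : PySem.List.sorted (i :: t) (fun p : Int × Int => p.2) true ≠ [] := by
      simp [PySem.List.sorted_eq_nil_iff]
    obtain ⟨a, l, hso⟩ := List.exists_cons_of_ne_nil hne2
    rw [hso] at h1
    rw [PySem.List.pyGetD_zero, hso]
    simpa using h1
  rw [hhead]
  -- the error: sum of non-best counts = |m| − best count
  have hbmem : best ∈ i :: t := by
    rcases foldl_max_mem_pairs t i with h | h
    · exact h ▸ List.mem_cons_self
    · exact List.mem_cons_of_mem _ h
  have hnd : ((i :: t).map (·.1)).Nodup := by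
    have := PySem.Dict.nodup_keys_counter m
    simpa [PySem.Dict.keys, hit] using this
  have hsum : (((i :: t).filter (fun p => p.1 != best.1)).map (fun p => p.2)).sum
      = ((i :: t).map (fun p => p.2)).sum - best.2 := sum_filter_ne_fst (i :: t) hnd hbmem
  have htot : ((i :: t).map (fun p => p.2)).sum = (m.length : Int) := by
    rw [← hit]; exact sum_counter_values m
  rw [hsum, htot]
  simp [PySem.List.pyGetD_zero_cons, ← hbest]
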